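-- pv_equiv track=rewrite | github.com/K-dash/pyropust | tools/check_type_modes.py | _mode3
-- ===== SOURCE A (Python) =====
-- def _mode3(text: str) -> str:
--     # Phantom generic Ok: infer CodeT from context (no _code_type param).
--     lines: list[str] = []
--     src = text.splitlines()
--     i = 0
--     while i < len(src):
--         line = src[i]
--         if line.lstrip().startswith("@overload"):
--             # Skip @overload if next non-empty line is def Ok
--             j = i + 1
--             while j < len(src) and src[j].strip() == "":
--                 j += 1
--             if j < len(src) and src[j].lstrip().startswith("def Ok"):
--                 i += 1
--                 continue
--         if line.lstrip().startswith("def Ok"):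
--             lines.append("def Ok[T, CodeT: ErrorCode](value: T) -> Result[T, Error[CodeT]]: ...")
--             i += 1
--             continue
--         lines.append(line)
--         i += 1
--     return "\n".join(lines) + "\n"
-- ===== SOURCE B (Python) =====
-- def _mode3(text: str) -> str:
--     # Single reverse pass with O(1) state: no forward lookahead.
--     # next_is_ok records whether the closest non-blank line below is an Ok definition.
--     src = text.splitlines()
--     out: list[str] = []
--     next_is_ok = False
--     for line in reversed(src):
--         stripped = line.lstrip()
--         if stripped.startswith("def Ok"):
--             out.append("def Ok[T, CodeT: ErrorCode](value: T) -> Result[T, Error[CodeT]]: ...")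
--         elif not (stripped.startswith("@overload") and next_is_ok):
--             out.append(line)
--         if line.strip() != "":
--             next_is_ok = stripped.startswith("def Ok")
--     out.reverse()
--     return "\n".join(out) + "\n"
-- ===== Notes on version B (the rewrite author's own statement) =====
-- stated objective: alternative
-- what changed: Replaced A's forward lookahead (an inner while scanning ahead over blank lines at each @overload) by a single reverse pass carrying one boolean flag that records whether the closest non-blank line below is an Ok definition, so no inner scan or index arithmetic remains.
import Mathlib
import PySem

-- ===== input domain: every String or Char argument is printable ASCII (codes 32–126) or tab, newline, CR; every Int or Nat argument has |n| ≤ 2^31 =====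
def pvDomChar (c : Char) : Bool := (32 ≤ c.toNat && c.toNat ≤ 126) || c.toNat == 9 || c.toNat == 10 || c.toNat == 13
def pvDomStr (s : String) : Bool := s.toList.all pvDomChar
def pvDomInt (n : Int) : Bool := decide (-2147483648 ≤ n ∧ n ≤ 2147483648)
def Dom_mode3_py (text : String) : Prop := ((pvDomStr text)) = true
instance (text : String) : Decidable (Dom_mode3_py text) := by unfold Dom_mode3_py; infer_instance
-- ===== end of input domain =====

-- B replaces A's forward lookahead (inner while over blank lines) by ONE reverse pass
-- carrying a boolean flag (is the closest non-blank line below an Ok definition?); objective: alternative.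

def pvFix : String := "def Ok[T, CodeT: ErrorCode](value: T) -> Result[T, Error[CodeT]]: ..."

-- ===== PORT A =====
-- the inner `while j < len(src) and src[j].strip() == ""` lookahead of A
def pvLookOk : List String → Bool
  | [] => false
  | l :: rest =>
    if PySem.Str.strip l == "" then pvLookOk rest
    else PySem.Str.startswith (PySem.Str.lstrip l) "def Ok"

-- A's outer while-loop over index i, as structural recursion on the suffix src[i:]
def pvLoopA : List String → List String
  | [] => []
  | line :: rest =>
    if PySem.Str.startswith (PySem.Str.lstrip line) "@overload" && pvLookOk rest then
      pvLoopA rest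
    else if PySem.Str.startswith (PySem.Str.lstrip line) "def Ok" then
      pvFix :: pvLoopA rest
    else
      line :: pvLoopA rest

def mode3_py (text : String) : String :=
  PySem.Str.join "\n" (pvLoopA (PySem.Str.splitlines text)) ++ "\n"

-- ===== PORT B =====
-- one step of B's loop over reversed(src); state = (out so far, next_is_ok)
def pvStepB (st : List String × Bool) (line : String) : List String × Bool :=
  let stripped := PySem.Str.lstrip line
  let out :=
    if PySem.Str.startswith stripped "def Ok" then st.1 ++ [pvFix]
    else if !(PySem.Str.startswith stripped "@overload" && st.2) then st.1 ++ [line]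
    else st.1
  let flag := if PySem.Str.strip line != "" then PySem.Str.startswith stripped "def Ok" else st.2
  (out, flag)

def mode3_py_alt (text : String) : String :=
  let src := PySem.Str.splitlines text
  let st := (src.reverse).foldl pvStepB ([], false)
  PySem.Str.join "\n" st.1.reverse ++ "\n"

-- ===== PRECONDITION & SPEC =====
def Spec_mode3_py (text : String) (out : String) : Prop := out = mode3_py_alt text
instance (text : String) (out : String) : Decidable (Spec_mode3_py text out) := by unfold Spec_mode3_py; infer_instance

-- ===== CLAIM (what is proved, stated in full; the proofs are below) =====
def Claim_equal_mode3_py : Prop := ∀ (text : String), Dom_mode3_py text → Spec_mode3_py text (mode3_py text)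

-- ===== LEMMAS AND PROOFS =====

-- front-to-back recursive description of B's reverse fold
def pvH : List String → List String × Bool
  | [] => ([], false)
  | line :: rest =>
    ((if PySem.Str.startswith (PySem.Str.lstrip line) "def Ok" then pvFix :: (pvH rest).1
      else if !(PySem.Str.startswith (PySem.Str.lstrip line) "@overload" && (pvH rest).2) then
        line :: (pvH rest).1
      else (pvH rest).1),
     (if PySem.Str.strip line != "" then PySem.Str.startswith (PySem.Str.lstrip line) "def Ok"
      else (pvH rest).2))


lemma pvH_snd (src : List String) : (pvH src).2 = pvLookOk src := by
  induction src with
  | nil => rfl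
  | cons line rest ih =>
    by_cases h : PySem.Str.strip line = ""
    · simp [pvH, pvLookOk, h, ih]
    · simp [pvH, pvLookOk, h, ih]

-- a line starting with "@overload" cannot start with "def Ok"
lemma pv_disjoint (s : String)
    (h : PySem.Str.startswith s "@overload" = true) :
    PySem.Str.startswith s "def Ok" = false := by
  rw [PySem.Str.startswith_eq] at h ⊢
  rw [PySem.Chars.startswith_iff] at h
  by_contra hc
  rw [Bool.not_eq_false, PySem.Chars.startswith_iff] at hc
  obtain ⟨t1, h1⟩ := h
  obtain ⟨t2, h2⟩ := hc
  rw [← h1] at h2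
  simp at h2

lemma pvLoopA_eq_pvH (src : List String) : pvLoopA src = (pvH src).1 := by
  induction src with
  | nil => rfl
  | cons line rest ih =>
    by_cases hov : PySem.Str.startswith (PySem.Str.lstrip line) "@overload" = true
    · have hdk := pv_disjoint _ hov
      simp at hov hdk
      by_cases hlk : pvLookOk rest = true
      · simp [pvLoopA, pvH, pvH_snd, hov, hdk, hlk, ih]
      · simp only [Bool.not_eq_true] at hlk
        simp [pvLoopA, pvH, pvH_snd, hov, hdk, hlk, ih]
    · simp only [Bool.not_eq_true] at hov
      simp at hov
      simp [pvLoopA, pvH, pvH_snd, hov, ih]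

lemma pv_foldB (src : List String) (acc : List String) :
    src.reverse.foldl pvStepB (acc, false)
      = (acc ++ (pvH src).1.reverse, (pvH src).2) := by
  induction src generalizing acc with
  | nil => simp [pvH]
  | cons line rest ih =>
    simp only [List.reverse_cons, List.foldl_append, List.foldl_cons, List.foldl_nil, ih]
    by_cases hdk : PySem.Str.startswith (PySem.Str.lstrip line) "def Ok" = true
    · simp at hdk
      simp [pvStepB, pvH, hdk]
    · simp only [Bool.not_eq_true] at hdk
      simp at hdk
      by_cases hov : PySem.Str.startswith (PySem.Str.lstrip line) "@overload" = true
      · simp at hov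
        by_cases hf : (pvH rest).2 = true
        · simp [pvStepB, pvH, hdk, hov, hf]
        · simp only [Bool.not_eq_true] at hf
          simp [pvStepB, pvH, hdk, hov, hf]
      · simp only [Bool.not_eq_true] at hov
        simp at hov
        simp [pvStepB, pvH, hdk, hov]

-- ===== VERDICT (by name: the statement is the Claim_ definition above) =====
theorem mode3_py_spec : Claim_equal_mode3_py := by
  intro text _
  show PySem.Str.join "\n" (pvLoopA (PySem.Str.splitlines text)) ++ "\n"
      = PySem.Str.join "\n"
          (((PySem.Str.splitlines text).reverse.foldl pvStepB ([], false)).1.reverse) ++ "\n"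
  rw [pv_foldB _ []]
  simp [pvLoopA_eq_pvH]
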